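-- pv_equiv track=rewrite | github.com/LooperXX/MPEToDs | prepare_data/preprocess_gp.py | divide_dialogue
-- ===== SOURCE A (Python) =====
-- max_seq_len = 128
--
-- def divide_dialogue(input):
--     result = []
--     sens_len = sum([len(sen.split('\t')[0].split(' ')) for sen in input])
--     if sens_len <= max_seq_len:
--         result.append(input)
--     else:
--         if len(input) == 2:
--             return []
--         divide = len(input) // 2
--         if divide % 2 == 1:
--             divide -= 1
--         result.extend(divide_dialogue(input[:divide]))
--         result.extend(divide_dialogue(input[divide:]))
--     return result
-- ===== SOURCE B (Python) =====
-- max_seq_len = 128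
--
-- def divide_dialogue(input):
--     # One pass to count tokens per sentence, prefix sums for O(1) segment length,
--     # and an explicit stack of index ranges instead of recursion with list copies.
--     counts = [len(sen.split('\t')[0].split(' ')) for sen in input]
--     prefix = [0]
--     for c in counts:
--         prefix.append(prefix[-1] + c)
--     result = []
--     stack = [(0, len(input))]
--     while stack:
--         lo, hi = stack.pop()
--         if prefix[hi] - prefix[lo] <= max_seq_len:
--             result.append(input[lo:hi])
--         elif hi - lo == 2:
--             continue
--         else:
--             d = (hi - lo) // 2
--             if d % 2 == 1:
--                 d -= 1
--             stack.append((lo + d, hi))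
--             stack.append((lo, lo + d))
--     return result
-- ===== Notes on version B (the rewrite author's own statement) =====
-- stated objective: faster
-- what changed: B precomputes per-sentence token counts once and a prefix-sum array for O(1) segment length, and replaces the recursion with list-copy re-tokenization by an explicit stack of index ranges; Pre_ excludes exactly the inputs on which A recurses forever (RecursionError): a single over-limit sentence, or odd length >= 3 with the last three sentences over the 128-token limit (B's loop does not terminate there either).
import Mathlib
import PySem

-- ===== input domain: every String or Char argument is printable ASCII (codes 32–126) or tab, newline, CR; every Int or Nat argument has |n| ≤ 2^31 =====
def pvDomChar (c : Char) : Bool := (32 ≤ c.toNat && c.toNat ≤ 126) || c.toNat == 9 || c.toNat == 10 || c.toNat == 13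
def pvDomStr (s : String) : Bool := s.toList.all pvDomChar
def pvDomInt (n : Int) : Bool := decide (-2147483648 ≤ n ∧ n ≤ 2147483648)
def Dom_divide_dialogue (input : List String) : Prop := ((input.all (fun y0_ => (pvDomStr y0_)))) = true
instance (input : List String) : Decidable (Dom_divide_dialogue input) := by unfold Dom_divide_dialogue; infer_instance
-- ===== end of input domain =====

-- B replaces A's recursion (which re-tokenizes every sentence at each level and copies slices)
-- by one tokenization pass + prefix sums and an explicit stack of index ranges (objective: faster).


-- ===== PORT A =====
-- len(sen.split('\t')[0].split(' ')) — the [0] of a nonempty split is headD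
def pvTokA (sen : String) : Nat :=
  (((PySem.Str.split? (((PySem.Str.split? sen "\t").getD []).headD "") " ")).getD []).length

-- A's recursion, with fuel (input.length + 1): A does not terminate on all inputs
-- (on Pre_ inputs the fuel is never exhausted; fuel 0 is unreachable there).
def divide_dialogue_go : Nat → List String → List (List String)
  | 0, _ => []
  | fuel+1, input =>
    let sens_len := (input.map (fun sen => pvTokA sen)).sum
    if sens_len ≤ 128 then [input]
    else if input.length = 2 then []
    else
      let divide := input.length / 2
      let divide := if divide % 2 = 1 then divide - 1 else divide
      divide_dialogue_go fuel (PySem.List.slice input none (some (divide : Int)))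
        ++ divide_dialogue_go fuel (PySem.List.slice input (some (divide : Int)) none)

def divide_dialogue (input : List String) : List (List String) :=
  divide_dialogue_go (input.length + 1) input

-- ===== PORT B =====
def pvTokB (sen : String) : Nat :=
  (((PySem.Str.split? (((PySem.Str.split? sen "\t").getD []).headD "") " ")).getD []).length

-- the prefix-sum list built by B's loop (prefix[-1] is getLastD of a nonempty list)
def pvPrefixB (counts : List Nat) : List Nat :=
  counts.foldl (fun acc c => acc ++ [acc.getLastD 0 + c]) [0]

-- B's while-loop over the explicit stack, with fuel (2*input.length + 1)
def divide_dialogue_alt_go (input : List String) (pre : List Nat) :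
    Nat → List (Nat × Nat) → List (List String) → List (List String)
  | 0, _, result => result
  | _+1, [], result => result
  | fuel+1, (lo, hi) :: stack, result =>
    if pre.getD hi 0 - pre.getD lo 0 ≤ 128 then
      divide_dialogue_alt_go input pre fuel stack
        (result ++ [PySem.List.slice input (some (lo : Int)) (some (hi : Int))])
    else if hi - lo = 2 then
      divide_dialogue_alt_go input pre fuel stack result
    else
      let d := (hi - lo) / 2
      let d := if d % 2 = 1 then d - 1 else d
      divide_dialogue_alt_go input pre fuel ((lo, lo + d) :: (lo + d, hi) :: stack) result

def divide_dialogue_alt (input : List String) : List (List String) :=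
  let counts := input.map pvTokB
  let pre := pvPrefixB counts
  divide_dialogue_alt_go input pre (2 * input.length + 1) [(0, input.length)] []

-- ===== PRECONDITION & SPEC =====
def pvTokSum (l : List String) : Nat := (l.map pvTokA).sum

-- Pre_ excludes EXACTLY the inputs on which A raises (RecursionError): A recurses forever iff
-- its recursion reaches a 1- or 3-sentence segment over the 128-token limit.  Because A's split
-- point is always even, the segments A can bottom out in are exactly the 2-sentence pairs plus,
-- for odd length ≥ 3, the final 3-sentence cell (and the whole input when it has ≤ 3 sentences);
-- so A raises iff the input is a single over-limit sentence, or has odd length ≥ 3 with its last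
-- three sentences over the limit.  (B's stack loop loops forever on the same inputs.)  No input
-- on which A returns a value is excluded.
def Pre_divide_dialogue (input : List String) : Prop :=
  (input.length = 1 → pvTokSum input ≤ 128) ∧
  (input.length % 2 = 1 → 3 ≤ input.length → pvTokSum (input.drop (input.length - 3)) ≤ 128)
instance (input : List String) : Decidable (Pre_divide_dialogue input) := by
  unfold Pre_divide_dialogue; infer_instance

def pvWitness_divide_dialogue : List String := ["hello there\tx", "general kenobi"]

def Spec_divide_dialogue (input : List String) (out : List (List String)) : Prop :=
  out = divide_dialogue_alt input
instance (input : List String) (out : List (List String)) : Decidable (Spec_divide_dialogue input out) := by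
  unfold Spec_divide_dialogue; infer_instance

-- ===== CLAIM =====
def Claim_equal_divide_dialogue : Prop :=
  ∀ (input : List String), Dom_divide_dialogue input → Pre_divide_dialogue input →
    Spec_divide_dialogue input (divide_dialogue input)

-- ===== LEMMAS AND PROOFS =====

-- A's split point for a segment of length n; it is always even and sits near n/2
def pvSplitPt (n : Nat) : Nat := if n / 2 % 2 = 1 then n / 2 - 1 else n / 2

lemma pvSplitPt_bounds {n : Nat} (h : 4 ≤ n) : 2 ≤ pvSplitPt n ∧ pvSplitPt n ≤ n - 2 := by
  unfold pvSplitPt; split_ifs <;> omega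

lemma pvSplitPt_even (n : Nat) : pvSplitPt n % 2 = 0 := by
  unfold pvSplitPt; split_ifs <;> omega

-- an overloaded Pre_-good segment of length ≠ 2 must have length ≥ 4
lemma good_len4 {l : List String} (hG : Pre_divide_dialogue l) (hs : ¬ pvTokSum l ≤ 128)
    (h2 : l.length ≠ 2) : 4 ≤ l.length := by
  by_contra hlt
  have h3 : l.length ≤ 3 := by omega
  have h0 : l.length ≠ 0 := by
    intro e
    have : l = [] := List.eq_nil_of_length_eq_zero e
    subst this
    exact hs (by simp [pvTokSum])
  have h1 : l.length ≠ 1 := fun e => hs (hG.1 e)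
  have hl3 : l.length = 3 := by omega
  have := hG.2 (by omega) (by omega)
  rw [hl3] at this
  simp only [Nat.sub_self, List.drop_zero] at this
  exact hs this

-- the invariant descends to the left half: its length is even (and ≥ 2), so Pre_ is vacuous
lemma good_take {l : List String} (h4 : 4 ≤ l.length) :
    Pre_divide_dialogue (l.take (pvSplitPt l.length)) := by
  obtain ⟨hd2, hdn⟩ := pvSplitPt_bounds h4
  have he := pvSplitPt_even l.length
  have hlt : (l.take (pvSplitPt l.length)).length = pvSplitPt l.length := by
    simp [List.length_take]; omega
  exact ⟨fun e => absurd (hlt ▸ e) (by omega),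
         fun e => absurd (hlt ▸ e) (by omega)⟩

-- and to the right half: it keeps the parity and the last three sentences of the whole
lemma good_drop {l : List String} (h4 : 4 ≤ l.length) (hG : Pre_divide_dialogue l) :
    Pre_divide_dialogue (l.drop (pvSplitPt l.length)) := by
  obtain ⟨hd2, hdn⟩ := pvSplitPt_bounds h4
  have he := pvSplitPt_even l.length
  have hlt : (l.drop (pvSplitPt l.length)).length = l.length - pvSplitPt l.length := by
    simp [List.length_drop]
  constructor
  · intro e; rw [hlt] at e; omega
  · intro hodd h3
    rw [hlt] at hodd h3
    have hlodd : l.length % 2 = 1 := by omega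
    have := hG.2 hlodd (by omega)
    rw [List.drop_drop, hlt]
    have e1 : pvSplitPt l.length + (l.length - pvSplitPt l.length - 3) = l.length - 3 := by omega
    rwa [e1]

-- scanl-style partial sums, for characterising pvPrefixB
def pvPsl (s : Nat) : List Nat → List Nat
  | [] => []
  | c :: cs => (s + c) :: pvPsl (s + c) cs

-- fuel cost of B's loop on a segment of the given length
def pvCost (l : Nat) : Nat := if l = 0 then 1 else 2 * l - 1

lemma pvTok_eq : pvTokA = pvTokB := rfl

-- pvPrefixB characterisation
lemma foldl_psl (cs : List Nat) : ∀ (acc : List Nat), acc ≠ [] →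
    cs.foldl (fun a c => a ++ [a.getLastD 0 + c]) acc = acc ++ pvPsl (acc.getLastD 0) cs := by
  induction cs with
  | nil => intro acc _; simp [pvPsl]
  | cons c cs ih =>
    intro acc hacc
    have h1 : (acc ++ [acc.getLastD 0 + c]) ≠ [] := by simp
    have h2 : (acc ++ [acc.getLastD 0 + c]).getLastD 0 = acc.getLastD 0 + c := by
      simp
    simp only [List.foldl_cons]
    rw [ih _ h1, h2, List.append_assoc]
    simp [pvPsl]

lemma pvPrefixB_eq (counts : List Nat) :
    pvPrefixB counts = 0 :: pvPsl 0 counts := by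
  unfold pvPrefixB
  rw [foldl_psl counts [0] (by simp)]
  simp

lemma pvPsl_getD (cs : List Nat) : ∀ (s i : Nat), i < cs.length →
    (pvPsl s cs).getD i 0 = s + (cs.take (i + 1)).sum := by
  induction cs with
  | nil => intro s i h; simp at h
  | cons c cs ih =>
    intro s i h
    cases i with
    | zero => simp [pvPsl]
    | succ j =>
      simp only [pvPsl, List.getD_cons_succ]
      rw [ih (s + c) j (by simpa using h)]
      simp [List.take_succ_cons, List.sum_cons]
      omega

lemma prefix_getD (counts : List Nat) (i : Nat) (h : i ≤ counts.length) :
    (pvPrefixB counts).getD i 0 = (counts.take i).sum := by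
  rw [pvPrefixB_eq]
  cases i with
  | zero => simp
  | succ j =>
    simp only [List.getD_cons_succ]
    rw [pvPsl_getD counts 0 j (by omega)]
    simp

-- the segment sum computed from the prefix list
lemma prefix_diff (counts : List Nat) {lo hi : Nat} (hlo : lo ≤ hi) (hhi : hi ≤ counts.length) :
    (pvPrefixB counts).getD hi 0 - (pvPrefixB counts).getD lo 0
      = ((counts.drop lo).take (hi - lo)).sum := by
  rw [prefix_getD counts hi hhi, prefix_getD counts lo (le_trans hlo hhi)]
  have : counts.take hi = counts.take lo ++ (counts.drop lo).take (hi - lo) := by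
    conv_lhs => rw [← List.take_append_drop lo (counts.take hi)]
    simp [List.take_take, Nat.min_eq_left hlo, List.drop_take]
  rw [this, List.sum_append]
  omega

-- A's fuel irrelevance on good inputs
lemma A_fuel_eq : ∀ (f₁ : Nat) (l : List String), Pre_divide_dialogue l →
    l.length + 1 ≤ f₁ → ∀ f₂, l.length + 1 ≤ f₂ →
    divide_dialogue_go f₁ l = divide_dialogue_go f₂ l := by
  intro f₁
  induction f₁ using Nat.strong_induction_on with
  | _ f₁ ih =>
    intro l hG h₁ f₂ h₂
    match f₁, h₁ with
    | fa + 1, h₁ =>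
    match f₂, h₂ with
    | fb + 1, h₂ =>
    simp only [divide_dialogue_go]
    by_cases hs : (l.map fun sen => pvTokA sen).sum ≤ 128
    · simp [hs]
    · simp only [if_neg hs]
      by_cases h2 : l.length = 2
      · simp [h2]
      · simp only [if_neg h2]
        have hlen : 4 ≤ l.length := good_len4 hG (by simpa [pvTokSum] using hs) h2
        have hdE : (if l.length / 2 % 2 = 1 then l.length / 2 - 1 else l.length / 2)
            = pvSplitPt l.length := rfl
        rw [hdE]
        obtain ⟨hd2, hdn⟩ := pvSplitPt_bounds hlen
        set d := pvSplitPt l.length with hd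
        rw [PySem.List.slice_to_natCast, PySem.List.slice_from_natCast]
        have hGt : Pre_divide_dialogue (l.take d) := good_take hlen
        have hGd : Pre_divide_dialogue (l.drop d) := good_drop hlen hG
        have hlt : (l.take d).length + 1 ≤ fa ∧ (l.take d).length + 1 ≤ fb := by
          simp [List.length_take]; omega
        have hld : (l.drop d).length + 1 ≤ fa ∧ (l.drop d).length + 1 ≤ fb := by
          simp [List.length_drop]; omega
        rw [ih fa (by omega) _ hGt hlt.1 fb hlt.2,
            ih fa (by omega) _ hGd hld.1 fb hld.2]

-- B's loop computes, for each stacked range, exactly A's result on that slice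
lemma B_loop_spec (input : List String) :
    ∀ (fuel : Nat) (stack : List (Nat × Nat)) (result : List (List String)),
    (∀ p ∈ stack, p.1 ≤ p.2 ∧ p.2 ≤ input.length ∧ Pre_divide_dialogue ((input.drop p.1).take (p.2 - p.1))) →
    (stack.map (fun p => pvCost (p.2 - p.1))).sum ≤ fuel →
    divide_dialogue_alt_go input (pvPrefixB (input.map pvTokB)) fuel stack result
      = result ++ (stack.map (fun p =>
          divide_dialogue_go (p.2 - p.1 + 1) ((input.drop p.1).take (p.2 - p.1)))).flatten := by
  intro fuel
  induction fuel using Nat.strong_induction_on with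
  | _ fuel ih =>
    intro stack result hb hc
    match stack with
    | [] =>
      match fuel with
      | 0 => simp [divide_dialogue_alt_go]
      | f + 1 => simp [divide_dialogue_alt_go]
    | (lo, hi) :: rest =>
      have hfuel : 1 ≤ fuel := by
        have : 1 ≤ pvCost (hi - lo) := by unfold pvCost; split_ifs <;> omega
        simp only [List.map_cons, List.sum_cons] at hc
        omega
      match fuel, hfuel with
      | f + 1, _ =>
      obtain ⟨hlo, hhi, hGseg⟩ := hb (lo, hi) (by simp)
      have hc1 : 1 ≤ pvCost (hi - lo) := by unfold pvCost; split_ifs <;> omega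
      have hseglen : ((input.drop lo).take (hi - lo)).length = hi - lo := by
        simp [List.length_take, List.length_drop]; omega
      have hdiff : (pvPrefixB (input.map pvTokB)).getD hi 0
            - (pvPrefixB (input.map pvTokB)).getD lo 0
          = (((input.drop lo).take (hi - lo)).map fun sen => pvTokA sen).sum := by
        rw [prefix_diff (input.map pvTokB) hlo (by simpa using hhi)]
        rw [← pvTok_eq, ← List.map_drop, ← List.map_take]
      simp only [divide_dialogue_alt_go]
      by_cases hsum : (pvPrefixB (input.map pvTokB)).getD hi 0
          - (pvPrefixB (input.map pvTokB)).getD lo 0 ≤ 128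
      · rw [if_pos hsum]
        rw [ih f (by omega) rest _ (fun p hp => hb p (by simp [hp]))
            (by simp only [List.map_cons, List.sum_cons] at hc; omega)]
        have hA : divide_dialogue_go (hi - lo + 1) ((input.drop lo).take (hi - lo))
            = [(input.drop lo).take (hi - lo)] := by
          simp only [divide_dialogue_go]
          rw [if_pos (by rw [← hdiff]; exact hsum)]
        rw [PySem.List.slice_natCast]
        simp [hA]
      · rw [if_neg hsum]
        have hsum' : ¬ ((((input.drop lo).take (hi - lo)).map fun sen => pvTokA sen).sum ≤ 128) := by
          rw [← hdiff]; exact hsum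
        by_cases h2 : hi - lo = 2
        · rw [if_pos h2]
          rw [ih f (by omega) rest _ (fun p hp => hb p (by simp [hp]))
              (by simp only [List.map_cons, List.sum_cons] at hc; omega)]
          have hA : divide_dialogue_go (hi - lo + 1) ((input.drop lo).take (hi - lo)) = [] := by
            simp only [divide_dialogue_go]
            rw [if_neg hsum', if_pos (by rw [hseglen]; exact h2)]
          simp [hA]
        · rw [if_neg h2]
          have hlen4 : 4 ≤ hi - lo := by
            have h := good_len4 hGseg (by simpa [pvTokSum] using hsum')
              (by rw [hseglen]; exact h2)
            rwa [hseglen] at h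
          obtain ⟨hd2', hdn'⟩ := pvSplitPt_bounds hlen4
          have hdE : (if (hi - lo) / 2 % 2 = 1 then (hi - lo) / 2 - 1 else (hi - lo) / 2)
              = pvSplitPt (hi - lo) := rfl
          rw [hdE]
          set d := pvSplitPt (hi - lo) with hd
          have eseg1 : ((input.drop lo).take (hi - lo)).take d = (input.drop lo).take d := by
            rw [List.take_take, Nat.min_eq_left (by omega)]
          have eseg2 : ((input.drop lo).take (hi - lo)).drop d
              = (input.drop (lo + d)).take (hi - (lo + d)) := by
            rw [List.drop_take, List.drop_drop]
            congr 1
            omega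
          have hGt : Pre_divide_dialogue ((input.drop lo).take (lo + d - lo)) := by
            have h := good_take (l := (input.drop lo).take (hi - lo))
              (by rw [hseglen]; exact hlen4)
            rw [hseglen, eseg1] at h
            have e1 : lo + d - lo = d := by omega
            rwa [e1]
          have hGd : Pre_divide_dialogue ((input.drop (lo + d)).take (hi - (lo + d))) := by
            have h := good_drop (l := (input.drop lo).take (hi - lo))
              (by rw [hseglen]; exact hlen4) hGseg
            rw [hseglen, eseg2] at h
            exact h
          have hbnd : ∀ p ∈ (lo, lo + d) :: (lo + d, hi) :: rest,
              p.1 ≤ p.2 ∧ p.2 ≤ input.length ∧ Pre_divide_dialogue ((input.drop p.1).take (p.2 - p.1)) := by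
            intro p hp
            simp only [List.mem_cons] at hp
            rcases hp with h | h | h
            · subst h; exact ⟨by omega, by omega, hGt⟩
            · subst h; exact ⟨by omega, by omega, hGd⟩
            · exact hb p (by simp [h])
          have hcost : (((lo, lo + d) :: (lo + d, hi) :: rest).map
              (fun p => pvCost (p.2 - p.1))).sum ≤ f := by
            simp only [List.map_cons, List.sum_cons] at hc ⊢
            have e1 : lo + d - lo = d := by omega
            have hcosts : pvCost d + pvCost (hi - (lo + d)) + 1 = pvCost (hi - lo) := by
              unfold pvCost; split_ifs <;> omega
            rw [e1]; omega
          rw [ih f (by omega) _ _ hbnd hcost]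
          -- rewrite A's head term as the concat of the two children
          have hAstep : divide_dialogue_go (hi - lo + 1) ((input.drop lo).take (hi - lo))
              = divide_dialogue_go (lo + d - lo + 1) ((input.drop lo).take (lo + d - lo))
                ++ divide_dialogue_go (hi - (lo + d) + 1) ((input.drop (lo + d)).take (hi - (lo + d))) := by
            conv_lhs => rw [divide_dialogue_go]
            rw [if_neg hsum', if_neg (by rw [hseglen]; exact h2)]
            simp only [hseglen]
            rw [hdE]
            rw [PySem.List.slice_to_natCast, PySem.List.slice_from_natCast]
            have e1 : lo + d - lo = d := by omega
            rw [eseg1, eseg2]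
            congr 1
            · rw [A_fuel_eq (hi - lo) _ (e1 ▸ hGt)
                  (by simp only [List.length_take, List.length_drop]; omega)
                  (d + 1) (by simp only [List.length_take, List.length_drop]; omega)]
              rw [e1]
            · rw [A_fuel_eq (hi - lo) _ hGd
                  (by simp only [List.length_take, List.length_drop]; omega)
                  (hi - (lo + d) + 1) (by simp only [List.length_take, List.length_drop]; omega)]
          simp only [List.map_cons, List.flatten_cons, hAstep]
          rw [List.append_assoc]

-- ===== VERDICT =====
theorem divide_dialogue_spec : Claim_equal_divide_dialogue := by
  intro input _hD hPre
  unfold Spec_divide_dialogue divide_dialogue divide_dialogue_alt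
  have hG : Pre_divide_dialogue input := hPre
  rw [B_loop_spec input (2 * input.length + 1) [(0, input.length)] []
      (by
        intro p hp; simp at hp; subst hp
        exact ⟨by simp, by simp, by simpa using hG⟩)
      (by simp [pvCost]; split_ifs <;> omega)]
  simp
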